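-- pv_equiv track=rewrite | github.com/mahdihaghverdi/DrFatemiDataStructureClass | dsp/exercises/second/ghostcost.py | subseqs
-- ===== SOURCE A (Python) =====
-- from itertools import combinations
-- from typing import List, Sequence
--
-- def subseqs(sequence: Sequence) -> List[List[int]]:
--     def key(subseq):
--         return len(subseq)
--
--     to_ret = [[num] for num in sequence]
--     to_ret.extend(
--         [
--             sequence[start: end + 1]  # type: ignore
--             for start, end in (combinations(range(len(sequence)), 2))
--         ],
--     )
--     return sorted(to_ret, key=key)
-- ===== SOURCE B (Python) =====
-- def subseqs(sequence):
--     out = [[num] for num in sequence]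
--     n = len(sequence)
--     for L in range(2, n + 1):
--         for start in range(n - L + 1):
--             out.append(sequence[start:start + L])
--     return out
-- ===== Notes on version B (the rewrite author's own statement) =====
-- stated objective: alternative
-- what changed: B generates the subsequences directly in length order (singletons first, then for each length L from 2 to n the slices left to right), eliminating A's combinations-then-stable-sort pipeline.
import Mathlib
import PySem

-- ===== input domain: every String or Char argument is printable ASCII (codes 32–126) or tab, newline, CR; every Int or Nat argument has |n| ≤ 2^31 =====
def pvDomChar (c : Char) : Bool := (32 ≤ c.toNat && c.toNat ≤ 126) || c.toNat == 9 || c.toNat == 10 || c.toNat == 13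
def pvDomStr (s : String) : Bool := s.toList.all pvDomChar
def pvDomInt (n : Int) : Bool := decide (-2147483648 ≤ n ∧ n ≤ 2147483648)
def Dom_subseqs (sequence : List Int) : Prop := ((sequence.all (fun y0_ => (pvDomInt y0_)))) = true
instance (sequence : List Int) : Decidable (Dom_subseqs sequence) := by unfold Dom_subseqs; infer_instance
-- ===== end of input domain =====

-- B builds the result directly in length order (singletons, then each length L from 2 up,
-- slices left to right), eliminating A's sort; same return value, no mutation observable.

-- ===== PORT A =====
def subseqs (sequence : List Int) : List (List Int) :=
  let toRet := sequence.map (fun num => [num])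
  let toRet := toRet ++
    (PySem.List.combinations (PySem.List.pyRange 0 (sequence.length : Int) 1) 2).map
      (fun c => match c with
        | [start, stop] => PySem.List.slice sequence (some start) (some (stop + 1))
        | _ => [])   -- unreachable: combinations … 2 yields 2-element lists (tuple unpacking)
  PySem.List.sorted toRet (fun subseq => subseq.length)

-- ===== PORT B =====
def subseqs_alt (sequence : List Int) : List (List Int) :=
  let out := sequence.map (fun num => [num])
  let n : Int := sequence.length
  (PySem.List.pyRange 2 (n + 1) 1).foldl (fun out L =>
    (PySem.List.pyRange 0 (n - L + 1) 1).foldl (fun out start =>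
      out ++ [PySem.List.slice sequence (some start) (some (start + L))]) out) out

-- ===== PRECONDITION & SPEC =====
def Spec_subseqs (sequence : List Int) (out : List (List Int)) : Prop := out = subseqs_alt sequence
instance (sequence : List Int) (out : List (List Int)) : Decidable (Spec_subseqs sequence out) := by unfold Spec_subseqs; infer_instance

-- ===== CLAIM (what is proved, stated in full; the proofs are below) =====
def Claim_equal_subseqs : Prop := ∀ (sequence : List Int), Dom_subseqs sequence → Spec_subseqs sequence (subseqs sequence)

-- ===== LEMMAS AND PROOFS =====

-- slice of length L starting at s (both ports' slices normalise to this)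
def pvSL (seq : List Int) (s L : Nat) : List Int := (seq.drop s).take L

-- canonical shape of B: singletons, then groups of length k+2 for k = 0 .. n-2
def pvGrp (seq : List Int) (k : Nat) : List (List Int) :=
  (List.range (seq.length - 1 - k)).map (fun s => pvSL seq s (k + 2))

def pvBn (seq : List Int) : List (List Int) :=
  seq.map (fun num => [num]) ++ (List.range (seq.length - 1)).flatMap (pvGrp seq)

-- the pair→slice map of port A, on Nat index pairs
def pvHH (seq : List Int) (c : List Nat) : List Int :=
  match c with
  | [i, j] => pvSL seq i (j + 1 - i)
  | _ => []

-- B normalises to pvBn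
lemma alt_eq_pvBn (seq : List Int) : subseqs_alt seq = pvBn seq := by
  simp only [subseqs_alt, pvBn]
  rw [show (fun (out : List (List Int)) (L : Int) =>
        (PySem.List.pyRange 0 ((seq.length : Int) - L + 1) 1).foldl
          (fun out start => out ++ [PySem.List.slice seq (some start) (some (start + L))]) out)
      = (fun (out : List (List Int)) (L : Int) =>
          out ++ (PySem.List.pyRange 0 ((seq.length : Int) - L + 1) 1).map
            (fun start => PySem.List.slice seq (some start) (some (start + L)))) from
      funext fun out => funext fun L => PySem.List.foldl_append_singleton_eq_map _ _ _,
    PySem.List.foldl_append_eq_flatMap]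
  congr 1
  rw [PySem.List.pyRange_one 2 ((seq.length : Int) + 1),
    show ((seq.length : Int) + 1 - 2).toNat = seq.length - 1 by omega, List.flatMap_map]
  apply List.flatMap_congr
  intro k hk
  rw [List.mem_range] at hk
  show (PySem.List.pyRange 0 ((seq.length : Int) - (2 + (k : Int)) + 1) 1).map
      (fun start => PySem.List.slice seq (some start) (some (start + (2 + (k : Int)))))
    = pvGrp seq k
  rw [show ((seq.length : Int) - (2 + (k : Int)) + 1) = ((seq.length - 1 - k : Nat) : Int) by omega,
    PySem.List.pyRange_zero_natCast, List.map_map]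
  apply List.map_congr_left
  intro s _
  show PySem.List.slice seq (some (s : Int)) (some ((s : Int) + (2 + (k : Int)))) = pvSL seq s (k + 2)
  rw [show ((s : Int) + (2 + (k : Int))) = ((s : Int) + ((k + 2 : Nat) : Int)) by push_cast; ring,
    PySem.List.slice_natCast_add]
  rfl

-- A's to_ret normalises to S ++ (combinations (range n) 2).map (pvHH seq)
lemma toRet_eq (seq : List Int) :
    subseqs seq = PySem.List.sorted
      (seq.map (fun num => [num]) ++
        (PySem.List.combinations (List.range seq.length) 2).map (pvHH seq))
      (fun subseq => subseq.length) := by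
  simp only [subseqs]
  rw [PySem.List.pyRange_zero_natCast, PySem.List.combinations_map, List.map_map]
  congr 2
  apply List.map_congr_left
  intro c hc
  obtain ⟨hsub, hlen⟩ := (PySem.List.mem_combinations_iff _ _ _).mp hc
  match c, hlen with
  | [i, k], _ =>
    show PySem.List.slice seq (some (i : Int)) (some ((k : Int) + 1)) = pvSL seq i (k + 1 - i)
    rw [show ((k : Int) + 1) = (((k + 1 : Nat)) : Int) by push_cast; ring,
      PySem.List.slice_natCast]
    rfl

-- filter (· = c) of a range'
lemma filter_eq_range' (c : Nat) : ∀ (m s : Nat),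
    (List.range' s m).filter (fun x => x == c) =
      if s ≤ c ∧ c < s + m then [c] else [] := by
  intro m
  induction m with
  | zero => intro s; rw [if_neg (by omega)]; rfl
  | succ m ih =>
    intro s
    rw [List.range'_succ, List.filter_cons]
    by_cases hs : s = c
    · subst hs
      rw [if_pos (by simp), ih, if_neg (by omega), if_pos (by omega)]
    · rw [if_neg (by simp [hs]), ih]
      split_ifs with h1 h2 h2 <;> first | rfl | omega

-- flatMap of an ite over range
lemma flatMap_ite_range {β : Type} (g : Nat → List β) (j : Nat) : ∀ (m : Nat),
    (List.range m).flatMap (fun k => if k + 2 = j then g k else []) =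
      if 2 ≤ j ∧ j - 2 < m then g (j - 2) else [] := by
  intro m
  induction m with
  | zero => rw [if_neg (by omega)]; rfl
  | succ m ih =>
    rw [List.range_succ, List.flatMap_append, ih, List.flatMap_cons, List.flatMap_nil,
      List.append_nil]
    by_cases hm : m + 2 = j
    · rw [if_pos hm, if_neg (by omega), if_pos (by omega), List.nil_append]
      congr 1
      omega
    · rw [if_neg hm, List.append_nil]
      split_ifs with h1 h2 h2 <;> first | rfl | omega

-- length of pvSL when it fits
lemma length_pvSL (seq : List Int) (s L : Nat) (h : s + L ≤ seq.length) :
    (pvSL seq s L).length = L := by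
  simp [pvSL]; omega

-- the filtered combinations slices, with the running-lower-bound invariant
lemma comb_filter (seq : List Int) (j : Nat) (hj : 2 ≤ j) : ∀ (m a : Nat),
    a + m = seq.length →
    (((PySem.List.combinations (List.range' a m) 2).map (pvHH seq)).filter
        (fun t => t.length == j)) =
      (List.range' a (m + 1 - j)).map (fun s => pvSL seq s j) := by
  intro m
  induction m with
  | zero =>
    intro a _
    rw [show (0 : Nat) + 1 - j = 0 by omega]
    rfl
  | succ m ih =>
    intro a ha
    rw [List.range'_succ, PySem.List.combinations_cons_succ, PySem.List.combinations_one,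
      List.map_map, List.map_append, List.filter_append, List.map_map, List.filter_map,
      ih (a + 1) (by omega)]
    have hcong : ∀ y ∈ List.range' (a + 1) m,
        (((fun t => t.length == j) ∘ pvHH seq ∘ (fun c => a :: c) ∘ fun x => [x]) y) = (y == a + j - 1) := by
      intro y hy
      rw [List.mem_range'_1] at hy
      show ((pvSL seq a (y + 1 - a)).length == j) = (y == a + j - 1)
      rw [length_pvSL seq a (y + 1 - a) (by omega), Bool.eq_iff_iff]
      simp only [beq_iff_eq]
      omega
    rw [List.filter_congr hcong, filter_eq_range' (a + j - 1) m (a + 1)]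
    by_cases hcase : j ≤ m + 1
    · rw [if_pos (by omega), show m + 1 + 1 - j = (m + 1 - j) + 1 by omega, List.range'_succ,
        List.map_cons, List.map_cons, List.map_nil, List.singleton_append]
      refine List.cons_eq_cons.mpr ⟨?_, rfl⟩
      show pvSL seq a (a + j - 1 + 1 - a) = pvSL seq a j
      congr 1
      omega
    · rw [if_neg (by omega), show m + 1 - j = 0 by omega, show m + 1 + 1 - j = 0 by omega]
      rfl

-- filters of the grouped side
lemma grp_filter (seq : List Int) (j : Nat) :
    ((List.range (seq.length - 1)).flatMap (pvGrp seq)).filter (fun t => t.length == j) =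
      if 2 ≤ j then (List.range' 0 (seq.length + 1 - j)).map (fun s => pvSL seq s j)
      else [] := by
  rw [List.filter_flatMap]
  have hcong : ∀ k ∈ List.range (seq.length - 1),
      (pvGrp seq k).filter (fun t => t.length == j) =
        if k + 2 = j then pvGrp seq k else [] := by
    intro k hk
    rw [List.mem_range] at hk
    have hlen : ∀ t ∈ pvGrp seq k, t.length = k + 2 := by
      intro t ht
      obtain ⟨s, hs, rfl⟩ := List.mem_map.mp ht
      rw [List.mem_range] at hs
      exact length_pvSL seq s (k + 2) (by omega)
    by_cases hkj : k + 2 = j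
    · rw [if_pos hkj, List.filter_eq_self.mpr]
      intro t ht
      simp [hlen t ht, hkj]
    · rw [if_neg hkj, List.filter_eq_nil_iff.mpr]
      intro t ht
      simp [hlen t ht, hkj]
  rw [List.flatMap_congr hcong, flatMap_ite_range (pvGrp seq) j (seq.length - 1)]
  by_cases hj : 2 ≤ j
  · by_cases hin : j - 2 < seq.length - 1
    · rw [if_pos ⟨hj, hin⟩, if_pos hj]
      unfold pvGrp
      rw [List.range_eq_range', show seq.length - 1 - (j - 2) = seq.length + 1 - j by omega,
        show j - 2 + 2 = j by omega]
    · rw [if_neg (by omega), if_pos hj, show seq.length + 1 - j = 0 by omega]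
      rfl
  · rw [if_neg (by omega), if_neg hj]

-- small-length filters of the combinations side vanish
lemma comb_filter_small (seq : List Int) (j : Nat) (hj : j < 2) :
    (((PySem.List.combinations (List.range seq.length) 2).map (pvHH seq)).filter
        (fun t => t.length == j)) = [] := by
  rw [List.filter_eq_nil_iff]
  intro t ht
  obtain ⟨c, hc, rfl⟩ := List.mem_map.mp ht
  obtain ⟨hsub, hlen⟩ := (PySem.List.mem_combinations_iff _ _ _).mp hc
  match c, hlen with
  | [i, k], _ =>
    have hik : i < k := by
      have hp := List.Pairwise.sublist hsub List.pairwise_lt_range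
      rw [List.pairwise_cons] at hp
      exact hp.1 k (by simp)
    have hkn : k < seq.length := by
      have := hsub.subset (by simp : k ∈ [i, k])
      rwa [List.mem_range] at this
    show ¬((pvSL seq i (k + 1 - i)).length == j) = true
    have : (pvSL seq i (k + 1 - i)).length = k + 1 - i :=
      length_pvSL seq i (k + 1 - i) (by omega)
    simp only [this, beq_iff_eq]
    omega

-- stable-sort stability: insertBy preserves key-class filters of an ordered list
lemma filter_insertBy {α : Type} (key : α → Nat) (j : Nat) (x : α) :
    ∀ (ys : List α), ys.Pairwise (fun a b => key a ≤ key b) →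
    (PySem.List.insertBy (fun a b => decide (key a < key b)) x ys).filter
        (fun y => key y == j) =
      ys.filter (fun y => key y == j) ++ (if key x = j then [x] else []) := by
  intro ys
  induction ys with
  | nil =>
    intro _
    simp only [PySem.List.insertBy, List.filter_nil, List.nil_append, List.filter_cons]
    split_ifs with h1 h2 h2 <;> simp_all
  | cons y ys ih =>
    intro hp
    rw [List.pairwise_cons] at hp
    simp only [PySem.List.insertBy]
    by_cases hlt : key x < key y
    · rw [if_pos (by simpa using hlt)]
      have hnil : (y :: ys).filter (fun z => key z == j) =
          (y :: ys).filter (fun z => key z == j) := rfl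
      by_cases hxj : key x = j
      · have hdrop : ∀ z ∈ y :: ys, ¬ (key z == j) = true := by
          intro z hz
          have : key y ≤ key z := by
            rcases hz with _ | hz
            · exact le_refl _
            · exact hp.1 z (by assumption)
          simp only [beq_iff_eq]
          omega
        rw [List.filter_eq_nil_iff.mpr hdrop]
        rw [List.filter_cons, if_pos (by simp [hxj]), List.filter_eq_nil_iff.mpr hdrop,
          if_pos hxj]
        rfl
      · rw [List.filter_cons, if_neg (by simp [hxj]), if_neg hxj, List.append_nil]
    · rw [if_neg (by simpa using hlt), List.filter_cons, List.filter_cons, ih hp.2]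
      split_ifs <;> simp

-- sorted preserves key-class filters
lemma filter_sorted {α : Type} (key : α → Nat) (j : Nat) (xs : List α) :
    (PySem.List.sorted xs key).filter (fun y => key y == j) =
      xs.filter (fun y => key y == j) := by
  induction xs using List.reverseRecOn with
  | nil => rfl
  | append_singleton xs x ih =>
    rw [PySem.List.sorted_eq_foldl_insertBy, List.foldl_append, List.foldl_cons,
      List.foldl_nil, ← PySem.List.sorted_eq_foldl_insertBy,
      filter_insertBy key j x _ (PySem.List.sorted_pairwise xs _), ih,
      List.filter_append, List.filter_cons, List.filter_nil]
    split_ifs with h1 h2 h2 <;> simp_all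

-- a key-ordered list is determined by its key-class filters
lemma eq_of_pairwise_of_filter {α : Type} (key : α → Nat) :
    ∀ (l₁ l₂ : List α), l₁.Pairwise (fun a b => key a ≤ key b) →
      l₂.Pairwise (fun a b => key a ≤ key b) →
      (∀ j, l₁.filter (fun y => key y == j) = l₂.filter (fun y => key y == j)) →
      l₁ = l₂ := by
  intro l₁
  induction l₁ with
  | nil =>
    intro l₂ _ _ hf
    cases l₂ with
    | nil => rfl
    | cons y t₂ =>
      have := hf (key y)
      simp at this
  | cons x t₁ ih =>
    intro l₂ hp₁ hp₂ hf
    cases l₂ with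
    | nil =>
      have := hf (key x)
      simp at this
    | cons y t₂ =>
      rw [List.pairwise_cons] at hp₁ hp₂
      have hyx : key y ≤ key x := by
        have hmem : x ∈ (y :: t₂).filter (fun z => key z == key x) := by
          rw [← hf (key x)]; simp
        rcases List.mem_cons.mp (List.mem_filter.mp hmem).1 with h | h
        · exact le_of_eq (by rw [h])
        · exact hp₂.1 x h
      have hxy : key x ≤ key y := by
        have hmem : y ∈ (x :: t₁).filter (fun z => key z == key y) := by
          rw [hf (key y)]; simp
        rcases List.mem_cons.mp (List.mem_filter.mp hmem).1 with h | h
        · exact le_of_eq (by rw [h])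
        · exact hp₁.1 y h
      have hk : key x = key y := le_antisymm hxy hyx
      have h1 := hf (key x)
      rw [List.filter_cons, List.filter_cons, if_pos (by simp), if_pos (by simp [hk])] at h1
      simp only [List.cons.injEq] at h1
      obtain ⟨hhead, _⟩ := h1
      subst hhead
      congr 1
      apply ih t₂ hp₁.2 hp₂.2
      intro j
      have h2 := hf j
      by_cases hj : key x = j
      · rw [List.filter_cons, List.filter_cons, if_pos (by simp [hj]), if_pos (by simp [hj])] at h2
        simpa using h2
      · rwa [List.filter_cons, List.filter_cons, if_neg (by simp [hj]), if_neg (by simp [hj])] at h2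

-- pvBn is ordered by length
lemma pvBn_pairwise (seq : List Int) :
    (pvBn seq).Pairwise (fun a b => a.length ≤ b.length) := by
  have hlen : ∀ k, ∀ t ∈ pvGrp seq k, t.length = k + 2 := by
    intro k t ht
    obtain ⟨s, hs, rfl⟩ := List.mem_map.mp ht
    rw [List.mem_range] at hs
    exact length_pvSL seq s (k + 2) (by omega)
  have hgrp : ∀ (m a : Nat),
      ((List.range' a m).flatMap (pvGrp seq)).Pairwise (fun u v => u.length ≤ v.length) := by
    intro m
    induction m with
    | zero => intro a; exact List.Pairwise.nil
    | succ m ih =>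
      intro a
      rw [List.range'_succ, List.flatMap_cons, List.pairwise_append]
      refine ⟨List.pairwise_of_forall_mem_list ?_, ih (a + 1), ?_⟩
      · intro u hu v hv
        rw [hlen a u hu, hlen a v hv]
      · intro u hu v hv
        obtain ⟨k, hk, hvk⟩ := List.mem_flatMap.mp hv
        rw [List.mem_range'_1] at hk
        rw [hlen a u hu, hlen k v hvk]
        omega
  unfold pvBn
  rw [List.pairwise_append]
  refine ⟨List.pairwise_of_forall_mem_list ?_, by rw [List.range_eq_range']; exact hgrp _ 0, ?_⟩
  · intro u hu v hv
    obtain ⟨x, _, rfl⟩ := List.mem_map.mp hu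
    obtain ⟨y, _, rfl⟩ := List.mem_map.mp hv
    exact le_refl _
  · intro u hu v hv
    obtain ⟨x, _, rfl⟩ := List.mem_map.mp hu
    obtain ⟨k, _, hvk⟩ := List.mem_flatMap.mp hv
    rw [hlen k v hvk]
    simp

-- ===== VERDICT (by name: the statement is the Claim_ definition above) =====
theorem subseqs_spec : Claim_equal_subseqs := by
  intro seq _
  show subseqs seq = subseqs_alt seq
  rw [toRet_eq, alt_eq_pvBn]
  apply eq_of_pairwise_of_filter (fun t : List Int => t.length)
  · exact PySem.List.sorted_pairwise _ _
  · exact pvBn_pairwise seq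
  · intro j
    rw [filter_sorted]
    unfold pvBn
    rw [List.filter_append, List.filter_append]
    congr 1
    rw [grp_filter]
    by_cases hj : 2 ≤ j
    · rw [if_pos hj, List.range_eq_range', comb_filter seq j hj seq.length 0 (by omega)]
    · rw [if_neg hj, comb_filter_small seq j (by omega)]
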